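-- pv_equiv track=rewrite | github.com/Porter-coder/special-architect | backend/src/services/code_parser.py | get_code_stats
-- ===== SOURCE A (Python) =====
-- from typing import Dict, List, Optional, Tuple
--
-- def get_code_stats(code: str) -> Dict[str, int]:
--     """
--     Get basic statistics about code.
--
--     Args:
--         code: Code string
--
--     Returns:
--         Statistics dictionary
--     """
--     lines = code.splitlines()
--
--     return {
--         "total_lines": len(lines),
--         "code_lines": len([line for line in lines if line.strip() and not line.strip().startswith('#')]),
--         "comment_lines": len([line for line in lines if line.strip().startswith('#')]),
--         "empty_lines": len([line for line in lines if not line.strip()]),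
--         "max_line_length": max(len(line) for line in lines) if lines else 0
--     }
-- ===== SOURCE B (Python) =====
-- def get_code_stats(code: str) -> dict:
--     total = code_lines = comment_lines = empty_lines = max_len = 0
--     for line in code.splitlines():
--         total += 1
--         s = line.strip()
--         if not s:
--             empty_lines += 1
--         elif s.startswith('#'):
--             comment_lines += 1
--         else:
--             code_lines += 1
--         max_len = max(max_len, len(line))
--     return {
--         "total_lines": total,
--         "code_lines": code_lines,
--         "comment_lines": comment_lines,
--         "empty_lines": empty_lines,
--         "max_line_length": max_len,
--     }
-- ===== Notes on version B (the rewrite author's own statement) =====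
-- stated objective: alternative
-- what changed: Replaces four separate comprehension passes (plus a max pass) over the lines with a single loop that classifies each stripped line into exactly one bucket and maintains all counters and the running max in one traversal.
import Mathlib
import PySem

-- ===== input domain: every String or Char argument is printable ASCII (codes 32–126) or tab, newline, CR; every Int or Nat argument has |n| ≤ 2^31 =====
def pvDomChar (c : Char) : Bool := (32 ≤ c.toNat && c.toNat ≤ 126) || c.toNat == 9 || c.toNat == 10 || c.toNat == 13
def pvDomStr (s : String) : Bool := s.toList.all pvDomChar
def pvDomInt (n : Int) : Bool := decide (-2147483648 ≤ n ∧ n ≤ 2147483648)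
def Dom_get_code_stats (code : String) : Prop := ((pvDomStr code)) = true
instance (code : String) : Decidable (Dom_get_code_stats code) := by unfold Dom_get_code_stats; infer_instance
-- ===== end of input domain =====

-- B replaces A's four separate comprehension passes (plus the max pass) with one
-- counter-maintaining loop over the lines (objective: alternative single-pass decomposition).

-- ===== PORT A =====
def get_code_stats (code : String) : List (String × Int) :=
  let lines := PySem.Str.splitlines code
  [("total_lines", (lines.length : Int)),
   ("code_lines", ((lines.filter (fun line =>
       decide (PySem.Str.strip line ≠ "") && !(PySem.Str.startswith (PySem.Str.strip line) "#"))).length : Int)),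
   ("comment_lines", ((lines.filter (fun line =>
       PySem.Str.startswith (PySem.Str.strip line) "#")).length : Int)),
   ("empty_lines", ((lines.filter (fun line =>
       decide (PySem.Str.strip line = ""))).length : Int)),
   ("max_line_length",
     match lines with
     | [] => 0
     | l :: ls => ls.foldl (fun acc line => max acc (PySem.Str.len line)) (PySem.Str.len l))]

-- ===== PORT B =====
def get_code_stats_alt (code : String) : List (String × Int) :=
  let st := (PySem.Str.splitlines code).foldl
    (fun (acc : Int × Int × Int × Int × Int) line =>
      let s := PySem.Str.strip line
      let total := acc.1 + 1
      let e := if s = "" then acc.2.2.2.1 + 1 else acc.2.2.2.1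
      let m := if s ≠ "" ∧ PySem.Str.startswith s "#" then acc.2.2.1 + 1 else acc.2.2.1
      let c := if s ≠ "" ∧ ¬ PySem.Str.startswith s "#" then acc.2.1 + 1 else acc.2.1
      (total, c, m, e, max acc.2.2.2.2 (PySem.Str.len line)))
    (0, 0, 0, 0, 0)
  [("total_lines", st.1),
   ("code_lines", st.2.1),
   ("comment_lines", st.2.2.1),
   ("empty_lines", st.2.2.2.1),
   ("max_line_length", st.2.2.2.2)]

-- ===== PRECONDITION & SPEC =====
def Spec_get_code_stats (code : String) (out : List (String × Int)) : Prop := out = get_code_stats_alt code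
instance (code : String) (out : List (String × Int)) : Decidable (Spec_get_code_stats code out) := by unfold Spec_get_code_stats; infer_instance

-- ===== CLAIM (what is proved, stated in full; the proofs are below) =====
def Claim_equal_get_code_stats : Prop := ∀ (code : String), Dom_get_code_stats code → Spec_get_code_stats code (get_code_stats code)

-- ===== LEMMAS AND PROOFS =====

theorem pv_fold_spec (ls : List String) (t c m e x : Int) :
    ls.foldl
      (fun (acc : Int × Int × Int × Int × Int) line =>
        let s := PySem.Str.strip line
        let total := acc.1 + 1
        let e := if s = "" then acc.2.2.2.1 + 1 else acc.2.2.2.1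
        let m := if s ≠ "" ∧ PySem.Str.startswith s "#" then acc.2.2.1 + 1 else acc.2.2.1
        let c := if s ≠ "" ∧ ¬ PySem.Str.startswith s "#" then acc.2.1 + 1 else acc.2.1
        (total, c, m, e, max acc.2.2.2.2 (PySem.Str.len line)))
      (t, c, m, e, x)
    = (t + ls.length,
       c + (ls.filter (fun line =>
         decide (PySem.Str.strip line ≠ "") && !(PySem.Str.startswith (PySem.Str.strip line) "#"))).length,
       m + (ls.filter (fun line => PySem.Str.startswith (PySem.Str.strip line) "#")).length,
       e + (ls.filter (fun line => decide (PySem.Str.strip line = ""))).length,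
       ls.foldl (fun acc line => max acc (PySem.Str.len line)) x) := by
  induction ls generalizing t c m e x with
  | nil => simp
  | cons l ls ih =>
    simp only [List.foldl_cons, List.filter_cons, ih, List.length_cons, Prod.mk.injEq]
    have hstc : PySem.Chars.startswith [] ['#'] = false := by decide
    by_cases h0 : PySem.Str.strip l = ""
    · simp [h0, hstc]; omega
    · by_cases h1 : PySem.Str.startswith (PySem.Str.strip l) "#" = true
      · simp at h1
        simp [h0, h1]; omega
      · simp at h1
        simp [h0, h1]; omega

theorem pv_len_nonneg (s : String) : 0 ≤ PySem.Str.len s := by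
  simp [PySem.Str.len_eq]

-- ===== VERDICT (by name: the statement is the Claim_ definition above) =====
theorem get_code_stats_spec : Claim_equal_get_code_stats := by
  intro code _
  unfold Spec_get_code_stats get_code_stats get_code_stats_alt
  rw [pv_fold_spec]
  cases h : PySem.Str.splitlines code with
  | nil => simp
  | cons l ls =>
    simp only [List.foldl_cons]
    rw [max_eq_right (pv_len_nonneg l)]
    simp
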